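-- pv_equiv track=rewrite | github.com/lvlvllvlvllvlvl/RePoE | RePoE/parser/modules/stat_translations.py | _convert_tags
-- ===== SOURCE A (Python) =====
-- from typing import Any, Dict, Iterator, List, Set, Tuple, Union
--
-- def _convert_tags(n_ids: int, tags: List[int], tags_types: List[str]) -> List[str]:
--     f = ["ignore" for _ in range(n_ids)]
--     for tag, tag_type in zip(tags, tags_types):
--         if tag >= n_ids:
--             continue
--         if tag_type in ["+", "+d"]:
--             f[tag] = "+#"
--         elif tag_type == "d":
--             f[tag] = "#"
--         elif tag_type == "":
--             f[tag] = "#"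
--         else:
--             raise Exception("Unknown tag type:", tag_type)
--     return f
-- ===== SOURCE B (Python) =====
-- _KNOWN = ("+", "+d", "d", "")
--
--
-- def _convert_tags(n_ids, tags, tags_types):
--     pairs = [(t, y) for t, y in zip(tags, tags_types) if t < n_ids]
--     for _, y in pairs:
--         if y not in _KNOWN:
--             raise Exception("Unknown tag type:", y)
--     out = []
--     for i in range(n_ids):
--         fmt = "ignore"
--         for t, y in reversed(pairs):
--             if t == i:
--                 fmt = "+#" if y.startswith("+") else "#"
--                 break
--         out.append(fmt)
--     return out
-- ===== Notes on version B (the rewrite author's own statement) =====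
-- stated objective: alternative
-- what changed: B replaces A's destructive positional fill (preallocate then mutate f[tag] per pair) with a search-based construction: it filters the in-range pairs, validates them, and then for each index in range(n_ids) scans the filtered pairs in reverse for the last pair with that tag, mapping its type to a format string; no list is ever mutated.
-- outside the precondition, e.g. on _convert_tags(2, [-1], ['d']): A returns ['ignore', '#'], B returns ['ignore', 'ignore']; on _convert_tags(2, [0], ['x']): A raises Exception, B raises Exception; on _convert_tags(2, [-5], ['d']): A raises IndexError, B returns ['ignore', 'ignore']
import Mathlib
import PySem

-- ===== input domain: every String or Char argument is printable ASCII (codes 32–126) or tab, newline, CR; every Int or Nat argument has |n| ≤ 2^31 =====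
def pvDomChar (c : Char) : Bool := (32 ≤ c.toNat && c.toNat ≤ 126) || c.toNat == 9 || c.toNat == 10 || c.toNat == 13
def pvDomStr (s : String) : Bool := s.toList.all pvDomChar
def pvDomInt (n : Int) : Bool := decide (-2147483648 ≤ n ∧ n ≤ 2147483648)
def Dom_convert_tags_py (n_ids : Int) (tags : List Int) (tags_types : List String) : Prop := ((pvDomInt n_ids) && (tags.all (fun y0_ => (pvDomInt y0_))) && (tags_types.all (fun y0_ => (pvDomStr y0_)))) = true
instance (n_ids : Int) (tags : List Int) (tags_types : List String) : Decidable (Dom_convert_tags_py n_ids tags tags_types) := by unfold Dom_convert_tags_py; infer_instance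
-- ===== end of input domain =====

-- B replaces A's destructive positional fill with a non-mutating search-based construction
-- (per index, reverse-scan the filtered pairs for the last matching tag); same result on Pre_.

-- ===== PORT A =====
def convert_tags_py (n_ids : Int) (tags : List Int) (tags_types : List String) : List String :=
  (tags.zip tags_types).foldl (fun f p =>
    if p.1 ≥ n_ids then f
    else if p.2 = "+" ∨ p.2 = "+d" then PySem.List.pySetD f p.1 "+#"
    else if p.2 = "d" then PySem.List.pySetD f p.1 "#"
    else if p.2 = "" then PySem.List.pySetD f p.1 "#"
    else f)  -- Python raises Exception("Unknown tag type:", …) here; excluded by Pre_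
    ((PySem.List.pyRange 0 n_ids 1).map (fun _ => "ignore"))

-- ===== PORT B =====
def convert_tags_py_alt (n_ids : Int) (tags : List Int) (tags_types : List String) : List String :=
  let pairs := (tags.zip tags_types).filter (fun p => p.1 < n_ids)
  -- Source B's validation loop over `pairs` raises on a type not in _KNOWN (excluded by Pre_)
  -- and otherwise has no effect on the result, so it contributes nothing to the pure value.
  (PySem.List.pyRange 0 n_ids 1).map (fun i =>
    match pairs.reverse.find? (fun p => p.1 == i) with
    | some p => if PySem.Str.startswith p.2 "+" then "+#" else "#"
    | none => "ignore")

-- ===== PRECONDITION & SPEC =====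
-- Pre_ excludes the inputs where A raises (an unknown tag type reached with tag < n_ids: Exception;
-- a tag below -n_ids reached with tag < n_ids: IndexError), and inputs with a negative tag,
-- malformed as a stat-id index, on which A's f[tag] assignment happens to wrap around Python-style
-- while B's equality search ignores it — both behaviours are accidental for such indices.
def Pre_convert_tags_py (n_ids : Int) (tags : List Int) (tags_types : List String) : Prop :=
  ∀ p ∈ tags.zip tags_types, p.1 < n_ids →
    ((p.2 = "+" ∨ p.2 = "+d" ∨ p.2 = "d" ∨ p.2 = "") ∧ 0 ≤ p.1)
instance (n_ids : Int) (tags : List Int) (tags_types : List String) : Decidable (Pre_convert_tags_py n_ids tags tags_types) := by unfold Pre_convert_tags_py; infer_instance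

def pvWitness_convert_tags_py : Int × List Int × List String := (2, [0, 1], ["+", "d"])

def Spec_convert_tags_py (n_ids : Int) (tags : List Int) (tags_types : List String) (out : List String) : Prop := out = convert_tags_py_alt n_ids tags tags_types
instance (n_ids : Int) (tags : List Int) (tags_types : List String) (out : List String) : Decidable (Spec_convert_tags_py n_ids tags tags_types out) := by unfold Spec_convert_tags_py; infer_instance

-- ===== CLAIM (what is proved, stated in full; the proofs are below) =====
def Claim_equal_convert_tags_py : Prop := ∀ (n_ids : Int) (tags : List Int) (tags_types : List String), Dom_convert_tags_py n_ids tags tags_types → Pre_convert_tags_py n_ids tags tags_types → Spec_convert_tags_py n_ids tags tags_types (convert_tags_py n_ids tags tags_types)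

-- ===== LEMMAS AND PROOFS =====
def pvAstep (n : Int) (f : List String) (p : Int × String) : List String :=
  if p.1 ≥ n then f
  else if p.2 = "+" ∨ p.2 = "+d" then PySem.List.pySetD f p.1 "+#"
  else if p.2 = "d" then PySem.List.pySetD f p.1 "#"
  else if p.2 = "" then PySem.List.pySetD f p.1 "#"
  else f

def pvFmt (s : String) : String := if PySem.Str.startswith s "+" then "+#" else "#"

-- A's fold skips out-of-range pairs, so it equals the fold over the filtered pairs.
lemma pv_filter (n : Int) (ps : List (Int × String)) (L : List String) :
    ps.foldl (pvAstep n) L = (ps.filter (fun p => p.1 < n)).foldl (pvAstep n) L := by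
  induction ps generalizing L with
  | nil => rfl
  | cons p ps ih =>
    by_cases h : p.1 < n
    · rw [List.foldl_cons, List.filter_cons_of_pos (by simpa using h), List.foldl_cons, ih]
    · rw [List.foldl_cons, List.filter_cons_of_neg (by simpa using h), ih]
      congr 1
      simp [pvAstep, le_of_not_gt h]

lemma pv_set_map (n : Int) (g : Int → String) (k : Int) (v : String) (hk0 : 0 ≤ k) :
    PySem.List.pySetD ((PySem.List.pyRange 0 n 1).map g) k v
      = (PySem.List.pyRange 0 n 1).map (fun i => if i = k then v else g i) := by
  rw [PySem.List.pySetD_of_nonneg _ _ hk0]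
  apply List.ext_getElem
  · simp
  · intro j h1 h2
    simp only [List.length_set, List.length_map, PySem.List.length_pyRange_one] at h1
    rw [List.getElem_set, List.getElem_map, List.getElem_map,
        PySem.List.getElem_pyRange_one]
    by_cases hjk : k.toNat = j
    · have : (0 : Int) + (j : Int) = k := by omega
      rw [if_pos hjk, this, if_pos rfl]
    · have hne : (0 : Int) + (j : Int) ≠ k := by omega
      rw [if_neg hjk, if_neg hne]

-- Loop invariant: the in-place fill over valid in-range pairs equals, at every index,
-- the reverse search for the last pair with that tag.
lemma pv_loop (n : Int) (ps : List (Int × String)) (g : Int → String)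
    (h : ∀ p ∈ ps, (p.2 = "+" ∨ p.2 = "+d" ∨ p.2 = "d" ∨ p.2 = "") ∧ 0 ≤ p.1 ∧ p.1 < n) :
    ps.foldl (pvAstep n) ((PySem.List.pyRange 0 n 1).map g)
      = (PySem.List.pyRange 0 n 1).map (fun i =>
          match ps.reverse.find? (fun p => p.1 == i) with
          | some p => pvFmt p.2
          | none => g i) := by
  induction ps generalizing g with
  | nil => simp
  | cons p ps ih =>
    obtain ⟨hty, hpos, hlt⟩ := h p List.mem_cons_self
    have hstep : pvAstep n ((PySem.List.pyRange 0 n 1).map g) p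
        = (PySem.List.pyRange 0 n 1).map (fun i => if i = p.1 then pvFmt p.2 else g i) := by
      unfold pvAstep
      rw [if_neg (by omega)]
      rcases hty with h' | h' | h' | h'
      · rw [if_pos (Or.inl h'), show ("+#" : String) = pvFmt p.2 from by rw [h']; decide]
        exact pv_set_map n g p.1 _ hpos
      · rw [if_pos (Or.inr h'), show ("+#" : String) = pvFmt p.2 from by rw [h']; decide]
        exact pv_set_map n g p.1 _ hpos
      · rw [if_neg (by rw [h']; decide), if_pos h',
          show ("#" : String) = pvFmt p.2 from by rw [h']; decide]
        exact pv_set_map n g p.1 _ hpos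
      · rw [if_neg (by rw [h']; decide), if_neg (by rw [h']; decide), if_pos h',
          show ("#" : String) = pvFmt p.2 from by rw [h']; decide]
        exact pv_set_map n g p.1 _ hpos
    rw [List.foldl_cons, hstep, ih _ (fun q hq => h q (List.mem_cons_of_mem _ hq))]
    apply List.map_congr_left
    intro i _
    rw [List.reverse_cons, List.find?_append]
    cases hfind : ps.reverse.find? (fun q => q.1 == i) with
    | some q => simp
    | none =>
      simp only [List.find?_singleton]
      by_cases hip : i = p.1
      · rw [if_pos hip]
        have : (p.1 == i) = true := by simp [hip]
        simp [this]
      · rw [if_neg hip]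
        have : (p.1 == i) = false := by simp [Ne.symm hip]
        simp [this]

-- ===== VERDICT (by name: the statement is the Claim_ definition above) =====
theorem convert_tags_py_spec : Claim_equal_convert_tags_py := by
  intro n tags types _ hpre
  show convert_tags_py n tags types = convert_tags_py_alt n tags types
  unfold convert_tags_py convert_tags_py_alt
  show (tags.zip types).foldl (pvAstep n) _ = _
  rw [pv_filter, pv_loop n _ (fun _ => "ignore")
    (by
      intro p hp
      have hmem := List.mem_of_mem_filter hp
      have hlt : p.1 < n := by
        have := List.of_mem_filter hp; simpa using this
      obtain ⟨h1, h2⟩ := hpre p hmem hlt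
      exact ⟨h1, h2, hlt⟩)]
  apply List.map_congr_left
  intro i _
  cases hfind : ((tags.zip types).filter (fun p => p.1 < n)).reverse.find? (fun p => p.1 == i) with
  | some q => simp [pvFmt]
  | none => simp
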